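-- pv_equiv track=rewrite | github.com/Rickerd1234/Advent-of-Code | 2022/Day 25/25.py | reduceDigit
-- ===== SOURCE A (Python) =====
-- factor_map = {
--     "2":2,
--     "1":1,
--     "0":0,
--     "-":-1,
--     "=":-2
-- }
--
-- def s2i(num):
--     return sum(factor_map[c] * (5**(len(num)-i-1)) for i, c in enumerate(num))
--
-- def reduceDigit(s, i, num):
--     pre = s[:i]
--     post = s[i+1:]
--     cur = s
--     for cv in factor_map.keys():
--         nxt =  pre + cv + post
--         if s2i(nxt) >= num:
--             cur = nxt
--         else:
--             return cur
--     return cur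
-- ===== SOURCE B (Python) =====
-- factor_map = {
--     "2":2,
--     "1":1,
--     "0":0,
--     "-":-1,
--     "=":-2
-- }
--
-- inverse_map = {2: "2", 1: "1", 0: "0", -1: "-", -2: "="}
--
-- def s2i(num):
--     return sum(factor_map[c] * (5**(len(num)-i-1)) for i, c in enumerate(num))
--
-- def reduceDigit(s, i, num):
--     pre = s[:i]
--     post = s[i+1:]
--     weight = 5 ** len(post)
--     rest = s2i(pre) * 5 ** (len(post) + 1) + s2i(post)
--     fv_min = -(-(num - rest) // weight)   # ceil((num - rest) / weight)
--     if fv_min > 2: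
--         return s
--     return pre + inverse_map[max(fv_min, -2)] + post
-- ===== Notes on version B (the rewrite author's own statement) =====
-- stated objective: alternative
-- what changed: Replaces the 5-way trial loop (which re-evaluates s2i on the whole candidate string for each digit) with a single closed-form computation: rest = s2i(pre)*5**(len(post)+1) + s2i(post), weight = 5**len(post), then the smallest feasible digit value is the ceiling division -(-(num-rest)//weight), clamped to [-2,2] and mapped back to a SNAFU character.
import Mathlib
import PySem

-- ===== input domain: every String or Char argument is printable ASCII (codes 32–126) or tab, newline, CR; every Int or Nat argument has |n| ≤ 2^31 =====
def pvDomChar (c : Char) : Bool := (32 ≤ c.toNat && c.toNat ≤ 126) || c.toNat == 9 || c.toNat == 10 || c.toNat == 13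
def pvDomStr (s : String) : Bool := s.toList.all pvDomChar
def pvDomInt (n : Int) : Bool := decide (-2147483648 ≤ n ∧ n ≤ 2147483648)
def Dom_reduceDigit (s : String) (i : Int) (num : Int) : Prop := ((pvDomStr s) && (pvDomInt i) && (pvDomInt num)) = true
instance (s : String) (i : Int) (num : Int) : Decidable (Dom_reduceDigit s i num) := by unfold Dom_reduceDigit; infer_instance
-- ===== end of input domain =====

-- B replaces A's 5-way trial loop by one closed-form ceiling-division computation of the
-- smallest feasible digit (objective: alternative algorithm of the same asymptotic cost).

-- ===== PORT A =====
def factorMap : PySem.Dict Char Int :=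
  PySem.Dict.ofList [('2', 2), ('1', 1), ('0', 0), ('-', -1), ('=', -2)]

-- s2i: sum(factor_map[c] * 5**(len(num)-i-1) for i, c in enumerate(num)).
-- factor_map[c] is ported as getD with default 0: a KeyError (invalid char) is excluded by
-- Pre_reduceDigit. The exponent len(num)-i-1 is ≥ 0 for every enumerate index, so Nat
-- subtraction is exact.
def s2i (num : List Char) : Int :=
  (PySem.List.enumerate num).foldl
    (fun acc p => acc + factorMap.getD p.2 0 * (5 : Int) ^ (num.length - p.1.toNat - 1)) 0

-- the 'for cv in factor_map.keys()' loop with its early return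
def loopA (pre post : List Char) (num : Int) : List Char → String → String
  | [], cur => cur
  | cv :: rest, cur =>
    let nxt := pre ++ [cv] ++ post
    if s2i nxt ≥ num then loopA pre post num rest (String.ofList nxt) else cur

def reduceDigit (s : String) (i : Int) (num : Int) : String :=
  let pre := PySem.List.slice s.toList none (some i)
  let post := PySem.List.slice s.toList (some (i + 1)) none
  loopA pre post num ['2', '1', '0', '-', '='] s

-- ===== PORT B =====
def inverseMap : PySem.Dict Int Char :=
  PySem.Dict.ofList [(2, '2'), (1, '1'), (0, '0'), (-1, '-'), (-2, '=')]

def reduceDigit_alt (s : String) (i : Int) (num : Int) : String :=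
  let pre := PySem.List.slice s.toList none (some i)
  let post := PySem.List.slice s.toList (some (i + 1)) none
  let weight : Int := (5 : Int) ^ post.length
  let rest : Int := s2i pre * (5 : Int) ^ (post.length + 1) + s2i post
  let fvMin : Int := -(PySem.Int.floordiv (-(num - rest)) weight)   -- ceil((num-rest)/weight)
  if fvMin > 2 then s
  -- inverse_map[max(fv_min, -2)]: the key is always in [-2, 2] here, so the getD default
  -- is never used (a KeyError is impossible)
  else String.ofList (pre ++ [inverseMap.getD (max fvMin (-2)) '?'] ++ post)

-- ===== PRECONDITION & SPEC =====
-- Pre_ excludes exactly the inputs on which Python A raises KeyError: a character of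
-- s[:i] or s[i+1:] that is not a SNAFU digit.
def Pre_reduceDigit (s : String) (i : Int) (num : Int) : Prop :=
  ((PySem.List.slice s.toList none (some i) ++ PySem.List.slice s.toList (some (i + 1)) none).all
    (fun c => c ∈ (['2', '1', '0', '-', '='] : List Char))) = true
instance (s : String) (i : Int) (num : Int) : Decidable (Pre_reduceDigit s i num) := by
  unfold Pre_reduceDigit; infer_instance

def pvWitness_reduceDigit : String × Int × Int := ("2=", 0, 3)

def Spec_reduceDigit (s : String) (i : Int) (num : Int) (out : String) : Prop := out = reduceDigit_alt s i num
instance (s : String) (i : Int) (num : Int) (out : String) : Decidable (Spec_reduceDigit s i num out) := by unfold Spec_reduceDigit; infer_instance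

-- ===== CLAIM (what is proved, stated in full; the proofs are below) =====
def Claim_equal_reduceDigit : Prop := ∀ (s : String) (i : Int) (num : Int), Dom_reduceDigit s i num → Pre_reduceDigit s i num → Spec_reduceDigit s i num (reduceDigit s i num)

-- ===== LEMMAS AND PROOFS =====

-- place value of a digit list: the structural characterisation of s2i
def snafuVal : List Char → Int
  | [] => 0
  | c :: t => factorMap.getD c 0 * (5 : Int) ^ t.length + snafuVal t

theorem s2i_aux (l : List Char) : ∀ (st n : Nat) (a : Int), n = st + l.length →
    (PySem.List.enumerate l (st : Int)).foldl
      (fun acc p => acc + factorMap.getD p.2 0 * (5 : Int) ^ (n - p.1.toNat - 1)) a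
    = a + snafuVal l := by
  induction l with
  | nil => intro st n a h; simp [PySem.List.enumerate_nil, snafuVal]
  | cons c t ih =>
    intro st n a h
    simp only [List.length_cons] at h
    rw [PySem.List.enumerate_cons]
    have : ((st : Int) + 1) = ((st + 1 : Nat) : Int) := by push_cast; ring
    simp only [List.foldl_cons, this]
    rw [ih (st + 1) n _ (by omega)]
    have hcast : ((st : Int)).toNat = st := by simp
    rw [hcast]
    have hpow : n - st - 1 = t.length := by omega
    rw [hpow, snafuVal]
    ring

theorem s2i_eq_snafuVal (l : List Char) : s2i l = snafuVal l := by
  have := s2i_aux l 0 l.length 0 (by omega)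
  simpa [s2i] using this

theorem snafuVal_append (xs ys : List Char) :
    snafuVal (xs ++ ys) = snafuVal xs * (5 : Int) ^ ys.length + snafuVal ys := by
  induction xs with
  | nil => simp [snafuVal]
  | cons c t ih =>
    simp only [List.cons_append, snafuVal, ih, List.length_append, pow_add]
    ring

theorem s2i_insert (pre post : List Char) (c : Char) :
    s2i (pre ++ [c] ++ post)
    = s2i pre * (5 : Int) ^ (post.length + 1) + factorMap.getD c 0 * (5 : Int) ^ post.length
      + s2i post := by
  simp only [s2i_eq_snafuVal, snafuVal_append, snafuVal, List.length_singleton, pow_succ,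
    List.length_nil, pow_zero]
  ring

-- ceiling division bracket: -((-x) // W) ≤ d ↔ x ≤ d * W, for 0 < W
theorem ceil_le_iff (W x d : Int) (hW : 0 < W) :
    -(PySem.Int.floordiv (-x) W) ≤ d ↔ x ≤ d * W := by
  rw [neg_le, PySem.Int.le_floordiv_iff_mul_le hW, neg_mul, neg_le_neg_iff]

theorem reduceDigit_spec : Claim_equal_reduceDigit := by
  intro s i num _ _
  unfold Spec_reduceDigit reduceDigit reduceDigit_alt
  simp only [loopA, ge_iff_le]
  set pre := PySem.List.slice s.toList none (some i) with hpre
  set post := PySem.List.slice s.toList (some (i + 1)) none with hpost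
  set W : Int := (5 : Int) ^ post.length with hW
  have hWpos : 0 < W := by positivity
  set R : Int := s2i pre * (5 : Int) ^ (post.length + 1) + s2i post with hR
  set m : Int := -(PySem.Int.floordiv (-(num - R)) W) with hm
  have hiff : ∀ d : Int, (m ≤ d ↔ num ≤ R + d * W) := by
    intro d
    rw [hm, ceil_le_iff _ _ _ hWpos]
    omega
  have hval : ∀ c : Char, s2i (pre ++ [c] ++ post) = R + factorMap.getD c 0 * W := by
    intro c
    rw [s2i_insert, hR, hW]; ring
  simp only [hval]
  have e2 : factorMap.getD '2' 0 = 2 := by decide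
  have e1 : factorMap.getD '1' 0 = 1 := by decide
  have e0 : factorMap.getD '0' 0 = 0 := by decide
  have em1 : factorMap.getD '-' 0 = -1 := by decide
  have em2 : factorMap.getD '=' 0 = -2 := by decide
  rw [e2, e1, e0, em1, em2]
  by_cases h2 : m ≤ 2
  · rw [if_pos ((hiff 2).mp h2)]
    by_cases h1 : m ≤ 1
    · rw [if_pos ((hiff 1).mp h1)]
      by_cases h0 : m ≤ 0
      · rw [if_pos ((hiff 0).mp h0)]
        by_cases hn1 : m ≤ -1
        · rw [if_pos ((hiff (-1)).mp hn1)]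
          by_cases hn2 : m ≤ -2
          · rw [if_pos ((hiff (-2)).mp hn2)]
            rw [if_neg (by omega), max_eq_right (by omega : m ≤ -2)]
            rfl
          · rw [if_neg (fun h => hn2 ((hiff (-2)).mpr h))]
            rw [if_neg (by omega)]
            have : max m (-2) = -1 := by omega
            rw [this]
            rfl
        · rw [if_neg (fun h => hn1 ((hiff (-1)).mpr h))]
          rw [if_neg (by omega)]
          have : max m (-2) = 0 := by omega
          rw [this]
          rfl
      · rw [if_neg (fun h => h0 ((hiff 0).mpr h))]
        rw [if_neg (by omega)]
        have : max m (-2) = 1 := by omega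
        rw [this]
        rfl
    · rw [if_neg (fun h => h1 ((hiff 1).mpr h))]
      rw [if_neg (by omega)]
      have : max m (-2) = 2 := by omega
      rw [this]
      rfl
  · rw [if_neg (fun h => h2 ((hiff 2).mpr h))]
    rw [if_pos (by omega)]
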